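-- pv_equiv track=rewrite | github.com/leigholiver/nydus | src/support/Worker.py | getActiveMenuLabel
-- ===== SOURCE A (Python) =====
-- def getActiveMenuLabel(uiResponse):
--     menus = [
--         "ScreenScore/ScreenScore",
--         "ScreenUserProfile/ScreenUserProfile",
--         "ScreenBattleLobby/ScreenBattleLobby",
--         "ScreenHome/ScreenHome",
--         "ScreenSingle/ScreenSingle",
--         "ScreenCollection/ScreenCollection",
--         "ScreenCoopCampaign/ScreenCoopCampaign",
--         "ScreenCustom/ScreenCustom",
--         "ScreenReplay/ScreenReplay",
--         "ScreenMultiplayer/ScreenMultiplayer",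
--         "ScreenLoading/ScreenLoading",
--     ]
--
--     for menu in menus:
--         if menu in uiResponse['activeScreens']:
--             return menu
--
--     return ""
-- ===== SOURCE B (Python) =====
-- def getActiveMenuLabel(uiResponse):
--     rank = {
--         "ScreenScore/ScreenScore": 0,
--         "ScreenUserProfile/ScreenUserProfile": 1,
--         "ScreenBattleLobby/ScreenBattleLobby": 2,
--         "ScreenHome/ScreenHome": 3,
--         "ScreenSingle/ScreenSingle": 4,
--         "ScreenCollection/ScreenCollection": 5,
--         "ScreenCoopCampaign/ScreenCoopCampaign": 6,
--         "ScreenCustom/ScreenCustom": 7,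
--         "ScreenReplay/ScreenReplay": 8,
--         "ScreenMultiplayer/ScreenMultiplayer": 9,
--         "ScreenLoading/ScreenLoading": 10,
--     }
--     best = ""
--     bestRank = len(rank)
--     for screen in uiResponse['activeScreens']:
--         r = rank.get(screen)
--         if r is not None and r < bestRank:
--             best, bestRank = screen, r
--     return best
-- ===== Notes on version B (the rewrite author's own statement) =====
-- stated objective: alternative
-- what changed: Instead of scanning the fixed 11-menu priority list and testing membership in activeScreens for each (nested scan), B builds a menu->rank index once and makes a single pass over activeScreens keeping the match with the smallest rank.
import Mathlib
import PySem

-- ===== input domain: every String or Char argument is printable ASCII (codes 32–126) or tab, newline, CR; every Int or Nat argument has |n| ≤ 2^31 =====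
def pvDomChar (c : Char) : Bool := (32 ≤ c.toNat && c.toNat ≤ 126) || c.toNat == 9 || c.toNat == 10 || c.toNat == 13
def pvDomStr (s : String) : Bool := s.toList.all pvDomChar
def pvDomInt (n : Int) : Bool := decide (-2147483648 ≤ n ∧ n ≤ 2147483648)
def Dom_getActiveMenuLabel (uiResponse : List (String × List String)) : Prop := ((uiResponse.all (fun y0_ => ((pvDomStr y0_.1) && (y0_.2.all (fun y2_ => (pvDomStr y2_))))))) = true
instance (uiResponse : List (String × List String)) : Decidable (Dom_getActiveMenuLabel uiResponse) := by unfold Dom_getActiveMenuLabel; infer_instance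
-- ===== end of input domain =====

-- B builds a menu->rank index and selects the minimum-rank active screen in one pass,
-- instead of A's scan of the fixed priority list with a membership test per menu (objective: alternative).

-- ===== PORT A =====
def pvMenusA : List String :=
  [ "ScreenScore/ScreenScore",
    "ScreenUserProfile/ScreenUserProfile",
    "ScreenBattleLobby/ScreenBattleLobby",
    "ScreenHome/ScreenHome",
    "ScreenSingle/ScreenSingle",
    "ScreenCollection/ScreenCollection",
    "ScreenCoopCampaign/ScreenCoopCampaign",
    "ScreenCustom/ScreenCustom",
    "ScreenReplay/ScreenReplay",
    "ScreenMultiplayer/ScreenMultiplayer",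
    "ScreenLoading/ScreenLoading" ]

-- the 'for menu in menus: if menu in …: return menu' loop
def pvLoopA : List String → List String → String
  | [], _ => ""
  | m :: ms, act => if act.contains m then m else pvLoopA ms act

def getActiveMenuLabel (uiResponse : List (String × List String)) : String :=
  match (PySem.Dict.mk uiResponse).get? "activeScreens" with
  | none => ""   -- Python raises KeyError here; excluded by Pre_
  | some act => pvLoopA pvMenusA act

-- ===== PORT B =====
def pvRankDict : PySem.Dict String Int :=
  PySem.Dict.ofList
    [ ("ScreenScore/ScreenScore", 0),
      ("ScreenUserProfile/ScreenUserProfile", 1),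
      ("ScreenBattleLobby/ScreenBattleLobby", 2),
      ("ScreenHome/ScreenHome", 3),
      ("ScreenSingle/ScreenSingle", 4),
      ("ScreenCollection/ScreenCollection", 5),
      ("ScreenCoopCampaign/ScreenCoopCampaign", 6),
      ("ScreenCustom/ScreenCustom", 7),
      ("ScreenReplay/ScreenReplay", 8),
      ("ScreenMultiplayer/ScreenMultiplayer", 9),
      ("ScreenLoading/ScreenLoading", 10) ]

-- loop body: r = rank.get(screen); if r is not None and r < bestRank: best, bestRank = screen, r
def pvStepB (st : String × Int) (screen : String) : String × Int :=
  match pvRankDict.get? screen with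
  | some r => if r < st.2 then (screen, r) else st
  | none => st

def getActiveMenuLabel_alt (uiResponse : List (String × List String)) : String :=
  match (PySem.Dict.mk uiResponse).get? "activeScreens" with
  | none => ""   -- Python raises KeyError here; excluded by Pre_
  | some act => (act.foldl pvStepB ("", (pvRankDict.size : Int))).1

-- ===== PRECONDITION & SPEC =====
-- Pre_ excludes exactly the inputs where both Pythons raise KeyError: no 'activeScreens' key.
def Pre_getActiveMenuLabel (uiResponse : List (String × List String)) : Prop :=
  "activeScreens" ∈ uiResponse.map Prod.fst
instance (uiResponse : List (String × List String)) : Decidable (Pre_getActiveMenuLabel uiResponse) := by unfold Pre_getActiveMenuLabel; infer_instance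

def pvWitness_getActiveMenuLabel : (List (String × List String)) :=
  [("activeScreens", ["foo", "ScreenHome/ScreenHome"])]

def Spec_getActiveMenuLabel (uiResponse : List (String × List String)) (out : String) : Prop := out = getActiveMenuLabel_alt uiResponse
instance (uiResponse : List (String × List String)) (out : String) : Decidable (Spec_getActiveMenuLabel uiResponse out) := by unfold Spec_getActiveMenuLabel; infer_instance

-- ===== CLAIM (what is proved, stated in full; the proofs are below) =====
def Claim_equal_getActiveMenuLabel : Prop := ∀ (uiResponse : List (String × List String)), Dom_getActiveMenuLabel uiResponse → Pre_getActiveMenuLabel uiResponse → Spec_getActiveMenuLabel uiResponse (getActiveMenuLabel uiResponse)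

-- ===== LEMMAS AND PROOFS =====

-- the rank of a screen: its index in pvMenusA, or 11 if absent
def pvRnk (s : String) : Int :=
  if "ScreenScore/ScreenScore" = s then 0
  else if "ScreenUserProfile/ScreenUserProfile" = s then 1
  else if "ScreenBattleLobby/ScreenBattleLobby" = s then 2
  else if "ScreenHome/ScreenHome" = s then 3
  else if "ScreenSingle/ScreenSingle" = s then 4
  else if "ScreenCollection/ScreenCollection" = s then 5
  else if "ScreenCoopCampaign/ScreenCoopCampaign" = s then 6
  else if "ScreenCustom/ScreenCustom" = s then 7
  else if "ScreenReplay/ScreenReplay" = s then 8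
  else if "ScreenMultiplayer/ScreenMultiplayer" = s then 9
  else if "ScreenLoading/ScreenLoading" = s then 10
  else 11

def pvMenuOf (q : Int) : String :=
  if q = 0 then "ScreenScore/ScreenScore"
  else if q = 1 then "ScreenUserProfile/ScreenUserProfile"
  else if q = 2 then "ScreenBattleLobby/ScreenBattleLobby"
  else if q = 3 then "ScreenHome/ScreenHome"
  else if q = 4 then "ScreenSingle/ScreenSingle"
  else if q = 5 then "ScreenCollection/ScreenCollection"
  else if q = 6 then "ScreenCoopCampaign/ScreenCoopCampaign"
  else if q = 7 then "ScreenCustom/ScreenCustom"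
  else if q = 8 then "ScreenReplay/ScreenReplay"
  else if q = 9 then "ScreenMultiplayer/ScreenMultiplayer"
  else if q = 10 then "ScreenLoading/ScreenLoading"
  else ""

-- minimum rank occurring in a list of screens (11 if none is a menu)
def pvMin : List String → Int
  | [] => 11
  | s :: xs => min (pvRnk s) (pvMin xs)

lemma pvRnk_bounds (s : String) : 0 ≤ pvRnk s ∧ pvRnk s ≤ 11 := by
  unfold pvRnk; split_ifs <;> norm_num

lemma pvRnk_cases (s : String) :
    pvRnk s = 11 ∨ (pvRnk s < 11 ∧ pvMenuOf (pvRnk s) = s) := by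
  unfold pvRnk
  split_ifs with h0 h1 h2 h3 h4 h5 h6 h7 h8 h9 h10
  all_goals first
    | (left; rfl)
    | (right; subst_vars; exact ⟨by norm_num, rfl⟩)

lemma pvMenuOf_pvRnk (s : String) (h : pvRnk s < 11) : pvMenuOf (pvRnk s) = s := by
  rcases pvRnk_cases s with h11 | ⟨_, he⟩
  · omega
  · exact he

set_option maxHeartbeats 1600000 in
lemma pvGet?_rank (s : String) :
    pvRankDict.get? s = if pvRnk s < 11 then some (pvRnk s) else none := by
  have hd : pvRankDict = PySem.Dict.mk
    [ ("ScreenScore/ScreenScore", 0),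
      ("ScreenUserProfile/ScreenUserProfile", 1),
      ("ScreenBattleLobby/ScreenBattleLobby", 2),
      ("ScreenHome/ScreenHome", 3),
      ("ScreenSingle/ScreenSingle", 4),
      ("ScreenCollection/ScreenCollection", 5),
      ("ScreenCoopCampaign/ScreenCoopCampaign", 6),
      ("ScreenCustom/ScreenCustom", 7),
      ("ScreenReplay/ScreenReplay", 8),
      ("ScreenMultiplayer/ScreenMultiplayer", 9),
      ("ScreenLoading/ScreenLoading", 10) ] := by rfl
  rw [hd]
  simp only [PySem.Dict.get?_mk_cons, beq_iff_eq]
  unfold pvRnk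
  by_cases h0 : "ScreenScore/ScreenScore" = s
  · simp only [if_pos h0]; norm_num
  · simp only [if_neg h0]
    by_cases h1 : "ScreenUserProfile/ScreenUserProfile" = s
    · simp only [if_pos h1]; norm_num
    · simp only [if_neg h1]
      by_cases h2 : "ScreenBattleLobby/ScreenBattleLobby" = s
      · simp only [if_pos h2]; norm_num
      · simp only [if_neg h2]
        by_cases h3 : "ScreenHome/ScreenHome" = s
        · simp only [if_pos h3]; norm_num
        · simp only [if_neg h3]
          by_cases h4 : "ScreenSingle/ScreenSingle" = s
          · simp only [if_pos h4]; norm_num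
          · simp only [if_neg h4]
            by_cases h5 : "ScreenCollection/ScreenCollection" = s
            · simp only [if_pos h5]; norm_num
            · simp only [if_neg h5]
              by_cases h6 : "ScreenCoopCampaign/ScreenCoopCampaign" = s
              · simp only [if_pos h6]; norm_num
              · simp only [if_neg h6]
                by_cases h7 : "ScreenCustom/ScreenCustom" = s
                · simp only [if_pos h7]; norm_num
                · simp only [if_neg h7]
                  by_cases h8 : "ScreenReplay/ScreenReplay" = s
                  · simp only [if_pos h8]; norm_num
                  · simp only [if_neg h8]
                    by_cases h9 : "ScreenMultiplayer/ScreenMultiplayer" = s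
                    · simp only [if_pos h9]; norm_num
                    · simp only [if_neg h9]
                      by_cases h10 : "ScreenLoading/ScreenLoading" = s
                      · simp only [if_pos h10]; norm_num
                      · simp only [if_neg h10]
                        norm_num [PySem.Dict.get?]

lemma pvStepB_eq (st : String × Int) (s : String) :
    pvStepB st s =
      if pvRnk s < 11 ∧ pvRnk s < st.2 then (s, pvRnk s) else st := by
  unfold pvStepB
  rw [pvGet?_rank]
  by_cases h : pvRnk s < 11
  · rw [if_pos h]
    show (if pvRnk s < st.2 then (s, pvRnk s) else st)
        = if pvRnk s < 11 ∧ pvRnk s < st.2 then (s, pvRnk s) else st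
    by_cases h2 : pvRnk s < st.2
    · rw [if_pos h2, if_pos ⟨h, h2⟩]
    · rw [if_neg h2, if_neg (by tauto)]
  · rw [if_neg h]
    show st = if pvRnk s < 11 ∧ pvRnk s < st.2 then (s, pvRnk s) else st
    rw [if_neg (by tauto)]

lemma pvMin_bounds (act : List String) : 0 ≤ pvMin act ∧ pvMin act ≤ 11 := by
  induction act with
  | nil => simp [pvMin]
  | cons s xs ih =>
      have := pvRnk_bounds s
      unfold pvMin
      rcases le_total (pvRnk s) (pvMin xs) with h | h
      · rw [min_eq_left h]; omega
      · rw [min_eq_right h]; omega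

lemma pvMin_le_of_mem {act : List String} {s : String} (h : s ∈ act) :
    pvMin act ≤ pvRnk s := by
  induction act with
  | nil => cases h
  | cons t xs ih =>
      rcases List.mem_cons.mp h with h | h
      · subst h; unfold pvMin; exact min_le_left _ _
      · have := ih h
        unfold pvMin
        have := min_le_right (pvRnk t) (pvMin xs)
        omega

lemma pvMin_attained {act : List String} (h : pvMin act < 11) :
    ∃ s ∈ act, pvRnk s = pvMin act := by
  induction act with
  | nil => simp [pvMin] at h
  | cons t xs ih =>
      unfold pvMin at h ⊢
      rcases le_total (pvRnk t) (pvMin xs) with hle | hle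
      · rw [min_eq_left hle] at h ⊢
        exact ⟨t, List.mem_cons_self, rfl⟩
      · rw [min_eq_right hle] at h ⊢
        obtain ⟨s, hs, hr⟩ := ih h
        exact ⟨s, List.mem_cons_of_mem _ hs, hr⟩

-- B's fold computes the minimum-rank screen
lemma pvFoldB (act : List String) : ∀ (b : String) (r : Int), r ≤ 11 →
    act.foldl pvStepB (b, r) =
      (if pvMin act < r then pvMenuOf (pvMin act) else b, min r (pvMin act)) := by
  induction act with
  | nil =>
      intro b r hr
      simp only [List.foldl_nil, pvMin]
      rw [if_neg (by omega), min_eq_left hr]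
  | cons s xs ih =>
      intro b r hr
      have hb := pvRnk_bounds s
      have hxs := pvMin_bounds xs
      have hmc : pvMin (s :: xs) = min (pvRnk s) (pvMin xs) := rfl
      simp only [List.foldl_cons, pvStepB_eq, hmc]
      by_cases hf : pvRnk s < 11 ∧ pvRnk s < r
      · rw [if_pos hf, ih s (pvRnk s) (by omega)]
        have hml : min (pvRnk s) (pvMin xs) < r := by
          have := min_le_left (pvRnk s) (pvMin xs); omega
        rw [if_pos hml]
        simp only [Prod.mk.injEq]
        refine ⟨?_, ?_⟩
        · by_cases h1 : pvMin xs < pvRnk s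
          · rw [if_pos h1, min_eq_right (by omega)]
          · rw [if_neg h1, min_eq_left (by omega), pvMenuOf_pvRnk s hf.1]
        · rw [min_eq_right hml.le]
      · rw [if_neg hf, ih b r hr]
        have hrs : r ≤ pvRnk s := by omega
        simp only [Prod.mk.injEq]
        refine ⟨?_, ?_⟩
        · by_cases h1 : pvMin xs < r
          · rw [if_pos h1, if_pos (by rw [min_eq_right (by omega)]; exact h1),
                min_eq_right (by omega)]
          · rw [if_neg h1, if_neg (by
              rcases le_total (pvRnk s) (pvMin xs) with h | h
              · rw [min_eq_left h]; omega
              · rw [min_eq_right h]; omega)]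
        · rcases le_total (pvRnk s) (pvMin xs) with h | h
          · rw [min_eq_left h, min_eq_left hrs, min_eq_left (by omega)]
          · rw [min_eq_right h]

lemma pvRnk_menusA (k : Nat) (h : k < 11) :
    pvRnk (pvMenusA[k]'(by simp [pvMenusA]; omega)) = k := by
  interval_cases k <;> rfl

-- A's scan from position k returns the minimum-rank screen when k does not pass it
lemma pvLoopA_drop (act : List String) : ∀ (j k : Nat), j = 11 - k → k ≤ 11 → (k : Int) ≤ pvMin act →
    pvLoopA (pvMenusA.drop k) act =
      if pvMin act < 11 then pvMenuOf (pvMin act) else "" := by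
  intro j
  induction j with
  | zero =>
      intro k hj hk hle
      have hk11 : k = 11 := by omega
      subst hk11
      rw [List.drop_of_length_le (by rw [show pvMenusA.length = 11 from rfl])]
      have hbd := pvMin_bounds act
      have h11 : pvMin act = 11 := by omega
      simp [pvLoopA, h11]
  | succ j ih =>
      intro k hj hk hle
      have hklt : k < 11 := by omega
      have hlt : k < pvMenusA.length := by rw [show pvMenusA.length = 11 from rfl]; omega
      rw [List.drop_eq_getElem_cons hlt]
      have hrnk := pvRnk_menusA k hklt
      unfold pvLoopA
      by_cases hmem : pvMenusA[k]'hlt ∈ act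
      · have h1 : pvMin act ≤ (k : Int) := by
          have := pvMin_le_of_mem hmem; omega
        have heq : pvMin act = (k : Int) := by omega
        rw [if_pos (by simpa using hmem), heq, if_pos (by omega)]
        rw [show pvMenuOf ((k : Int)) = pvMenusA[k]'hlt by
          rw [← hrnk]; exact pvMenuOf_pvRnk _ (by omega)]
      · have hne : pvMin act ≠ (k : Int) := by
          intro heq
          obtain ⟨s, hs, hr⟩ := pvMin_attained (act := act) (by omega)
          have hs2 : s = pvMenusA[k]'hlt := by
            have hm := pvMenuOf_pvRnk s (by omega)
            rw [hr, heq] at hm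
            rw [← hm, ← hrnk, pvMenuOf_pvRnk _ (by omega)]
          exact hmem (hs2 ▸ hs)
        rw [if_neg (by simpa using hmem)]
        exact ih (k + 1) (by omega) (by omega) (by push_cast; omega)

-- ===== VERDICT (by name: the statement is the Claim_ definition above) =====
theorem getActiveMenuLabel_spec : Claim_equal_getActiveMenuLabel := by
  intro ui _ _
  unfold Spec_getActiveMenuLabel getActiveMenuLabel getActiveMenuLabel_alt
  cases h : (PySem.Dict.mk ui).get? "activeScreens" with
  | none => rfl
  | some act =>
      dsimp only
      rw [show (pvRankDict.size : Int) = 11 from rfl, pvFoldB act "" 11 (by omega)]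
      have hbd := pvMin_bounds act
      have hL := pvLoopA_drop act 11 0 rfl (by omega) (by push_cast; omega)
      rw [List.drop_zero] at hL
      rw [hL]
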